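-- pv_equiv track=rewrite | github.com/Devika-codes/Phase-1-REAL-TIME-STRESS-AND-POSTURE-ANALYSIS | accuracy.py | _simulate_posture_smooth
-- ===== SOURCE A (Python) =====
-- NEEDED = 15
--
-- def _simulate_posture_smooth(sequence):
--     """
--     Simulate the bad/good counter logic in main.py.
--     sequence = list of "Bad" | "Good" per frame.
--     Returns the final smoothed_posture label.
--     """
--     bad_ctr  = 0
--     good_ctr = 0
--     smoothed = "Good"
--     for raw in sequence:
--         if raw == "Bad":
--             bad_ctr  = min(bad_ctr  + 1, NEEDED + 10)
--             good_ctr = 0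
--         else:
--             good_ctr = min(good_ctr + 1, NEEDED + 10)
--             bad_ctr  = max(bad_ctr  - 1, 0)
--
--         if bad_ctr  >= NEEDED: smoothed = "Bad"
--         elif good_ctr >= NEEDED: smoothed = "Good"
--         else: smoothed = raw   # use raw while still building up
--     return smoothed
-- ===== SOURCE B (Python) =====
-- NEEDED = 15
--
-- def _simulate_posture_smooth(sequence):
--     # Empty sequence: the loop never runs, label stays "Good".
--     if not sequence:
--         return "Good"
--     # Phase 1: forward bounded walk for the bad counter only.
--     bad = 0
--     for raw in sequence:
--         bad = min(bad + 1, NEEDED + 10) if raw == "Bad" else max(bad - 1, 0)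
--     # Phase 2: good counter = capped length of the trailing run of non-"Bad" frames.
--     good = 0
--     for raw in reversed(sequence):
--         if raw == "Bad":
--             break
--         good += 1
--     good = min(good, NEEDED + 10)
--     # Final threshold decision, on the last frame.
--     if bad >= NEEDED:
--         return "Bad"
--     if good >= NEEDED:
--         return "Good"
--     return sequence[-1]
-- ===== Notes on version B (the rewrite author's own statement) =====
-- stated objective: simpler
-- what changed: Drops the per-frame smoothed overwrite and the coupled good counter: B runs one forward pass maintaining only the bad counter, computes the good counter as the capped trailing run of non-Bad frames by a backward scan, and applies the threshold decision once at the end on the last frame.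
import Mathlib
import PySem

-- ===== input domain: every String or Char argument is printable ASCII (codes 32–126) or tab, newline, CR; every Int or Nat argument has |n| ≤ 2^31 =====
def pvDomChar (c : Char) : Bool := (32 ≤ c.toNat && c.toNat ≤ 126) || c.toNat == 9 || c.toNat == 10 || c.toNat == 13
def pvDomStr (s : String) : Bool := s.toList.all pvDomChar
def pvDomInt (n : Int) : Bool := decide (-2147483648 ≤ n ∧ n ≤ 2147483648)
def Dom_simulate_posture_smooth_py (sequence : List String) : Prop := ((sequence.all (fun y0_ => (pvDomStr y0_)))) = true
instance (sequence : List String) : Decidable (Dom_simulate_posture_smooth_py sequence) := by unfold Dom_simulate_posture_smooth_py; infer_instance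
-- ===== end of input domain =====

-- B replaces A's single coupled loop (two counters plus a per-frame smoothed overwrite) by a
-- forward pass for the bad counter, a backward trailing-run scan for the good counter, and one
-- final threshold decision; objective: simpler.

-- ===== PORT A =====
def pvNEEDED : Int := 15

-- one iteration of A's loop over the state (bad_ctr, good_ctr, smoothed)
def pvStepA (st : Int × Int × String) (raw : String) : Int × Int × String :=
  let bad := st.1
  let good := st.2.1
  let (bad', good') :=
    if raw = "Bad" then (min (bad + 1) (pvNEEDED + 10), (0 : Int))
    else (max (bad - 1) 0, min (good + 1) (pvNEEDED + 10))
  let smoothed :=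
    if bad' ≥ pvNEEDED then "Bad"
    else if good' ≥ pvNEEDED then "Good"
    else raw
  (bad', good', smoothed)

def simulate_posture_smooth_py (sequence : List String) : String :=
  (sequence.foldl pvStepA (0, 0, "Good")).2.2

-- ===== PORT B =====
-- bad-counter update of B's forward pass
def pvStepBad (bad : Int) (raw : String) : Int :=
  if raw = "Bad" then min (bad + 1) (pvNEEDED + 10) else max (bad - 1) 0

-- 'raw is not "Bad"': the continue-condition of B's backward scan
def pvNotBad (raw : String) : Bool := !(raw == "Bad")

def simulate_posture_smooth_py_alt (sequence : List String) : String :=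
  match sequence.getLast? with
  | none => "Good"
  | some lastRaw =>
    let bad := sequence.foldl pvStepBad 0
    let good : Int := min ((sequence.reverse.takeWhile pvNotBad).length : Int) (pvNEEDED + 10)
    if bad ≥ pvNEEDED then "Bad"
    else if good ≥ pvNEEDED then "Good"
    else lastRaw

-- ===== PRECONDITION & SPEC =====
def Spec_simulate_posture_smooth_py (sequence : List String) (out : String) : Prop := out = simulate_posture_smooth_py_alt sequence
instance (sequence : List String) (out : String) : Decidable (Spec_simulate_posture_smooth_py sequence out) := by unfold Spec_simulate_posture_smooth_py; infer_instance

-- ===== CLAIM (what is proved, stated in full; the proofs are below) =====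
def Claim_equal_simulate_posture_smooth_py : Prop := ∀ (sequence : List String), Dom_simulate_posture_smooth_py sequence → Spec_simulate_posture_smooth_py sequence (simulate_posture_smooth_py sequence)

-- ===== LEMMAS AND PROOFS =====

-- the good counter A's loop reaches when started from value g
def pvGoodVal (g : Int) (seq : List String) : Int :=
  if seq.all pvNotBad then min (g + seq.length) (pvNEEDED + 10)
  else min ((seq.reverse.takeWhile pvNotBad).length : Int) (pvNEEDED + 10)

-- the threshold decision applied at the end of each iteration
def pvDec (b g : Int) (raw : String) : String :=
  if b ≥ pvNEEDED then "Bad" else if g ≥ pvNEEDED then "Good" else raw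

lemma pv_takeWhile_append_all {α : Type} (p : α → Bool) (l₁ l₂ : List α)
    (h : ∀ x ∈ l₁, p x = true) : (l₁ ++ l₂).takeWhile p = l₁ ++ l₂.takeWhile p := by
  induction l₁ with
  | nil => simp
  | cons y ys ih =>
      simp only [List.cons_append, List.takeWhile_cons, h y (by simp)]
      simp [ih (fun x hx => h x (by simp [hx]))]

lemma pv_takeWhile_append_not {α : Type} (p : α → Bool) (l₁ l₂ : List α)
    (h : ¬ ∀ x ∈ l₁, p x = true) : (l₁ ++ l₂).takeWhile p = l₁.takeWhile p := by
  induction l₁ with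
  | nil => exact absurd (by simp) h
  | cons y ys ih =>
      by_cases hy : p y = true
      · have hys : ¬ ∀ x ∈ ys, p x = true := by
          intro hall; apply h; intro x hx
          rcases List.mem_cons.mp hx with rfl | hx'
          · exact hy
          · exact hall x hx'
        simp [hy, ih hys]
      · simp [hy]

lemma pv_takeWhile_all {α : Type} (p : α → Bool) (l : List α)
    (h : ∀ x ∈ l, p x = true) : l.takeWhile p = l := by
  have := pv_takeWhile_append_all p l [] h
  simpa using this

lemma pvNotBad_bad : pvNotBad "Bad" = false := by decide

lemma pvGoodVal_cons_bad (g : Int) (xs : List String) :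
    pvGoodVal 0 xs = pvGoodVal g ("Bad" :: xs) := by
  unfold pvGoodVal
  have hall' : (("Bad" :: xs).all pvNotBad) = false := by
    simp [List.all_cons, pvNotBad_bad]
  rw [hall']
  simp only [Bool.false_eq_true, if_false, List.reverse_cons]
  by_cases hall : xs.all pvNotBad = true
  · have hmem : ∀ x ∈ xs.reverse, pvNotBad x = true := by
      intro y hy; exact (List.all_eq_true.mp hall) y (List.mem_reverse.mp hy)
    rw [hall]
    rw [pv_takeWhile_append_all pvNotBad xs.reverse [ "Bad" ] hmem]
    simp [pvNotBad_bad]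
  · have hnot : ¬ ∀ y ∈ xs.reverse, pvNotBad y = true := by
      intro hall2
      exact hall (List.all_eq_true.mpr (fun y hy => hall2 y (List.mem_reverse.mpr hy)))
    rw [pv_takeWhile_append_not pvNotBad xs.reverse ["Bad"] hnot]
    simp [hall]

lemma pvGoodVal_cons_good (g : Int) (x : String) (xs : List String)
    (hx : ¬ x = "Bad") (hg0 : 0 ≤ g) (hg : g ≤ pvNEEDED + 10) :
    pvGoodVal (min (g + 1) (pvNEEDED + 10)) xs = pvGoodVal g (x :: xs) := by
  have hpx : pvNotBad x = true := by simp [pvNotBad, hx]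
  unfold pvGoodVal
  have hall' : (x :: xs).all pvNotBad = xs.all pvNotBad := by
    simp [List.all_cons, hpx]
  rw [hall']
  by_cases hall : xs.all pvNotBad = true
  · rw [hall]
    simp only [if_true, List.length_cons]
    have hlen : (0:Int) ≤ (xs.length : Int) := Int.natCast_nonneg _
    unfold pvNEEDED at *
    push_cast
    omega
  · have hnot : ¬ ∀ y ∈ xs.reverse, pvNotBad y = true := by
      intro hall2
      exact hall (List.all_eq_true.mpr (fun y hy => hall2 y (List.mem_reverse.mpr hy)))
    rw [List.reverse_cons, pv_takeWhile_append_not pvNotBad xs.reverse [x] hnot]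
    simp [hall]

lemma pv_getLast?_cons_ne {x : String} {xs : List String} (h : xs ≠ []) :
    (x :: xs).getLast? = xs.getLast? := by
  cases xs with
  | nil => exact absurd rfl h
  | cons y ys => simp [List.getLast?_cons_cons]

-- main characterisation of A's loop
lemma pv_loopA_char : ∀ (seq : List String) (b g : Int) (s : String),
    0 ≤ g → g ≤ pvNEEDED + 10 →
    seq.foldl pvStepA (b, g, s) =
      (seq.foldl pvStepBad b, pvGoodVal g seq,
       match seq.getLast? with
       | none => s
       | some lastRaw => pvDec (seq.foldl pvStepBad b) (pvGoodVal g seq) lastRaw) := by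
  intro seq
  induction seq with
  | nil =>
      intro b g s hg0 hg
      simp only [List.foldl_nil, List.getLast?_nil, pvGoodVal, List.all_nil, List.length_nil]
      unfold pvNEEDED at hg
      simp only [if_true]
      have : min (g + (0:Nat)) (pvNEEDED + 10) = g := by
        unfold pvNEEDED; push_cast; omega
      rw [this]
  | cons x xs ih =>
      intro b g s hg0 hg
      by_cases hx : x = "Bad"
      · subst hx
        have hstep : pvStepA (b, g, s) "Bad"
            = (pvStepBad b "Bad", 0, pvDec (pvStepBad b "Bad") 0 "Bad") := by
          simp [pvStepA, pvStepBad, pvDec]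
        have hrec := ih (pvStepBad b "Bad") 0
          (pvDec (pvStepBad b "Bad") 0 "Bad") le_rfl (by unfold pvNEEDED; omega)
        have hgood := pvGoodVal_cons_bad g xs
        cases hxs : xs.getLast? with
        | none =>
            have hnil : xs = [] := List.getLast?_eq_none_iff.mp hxs
            subst hnil
            simp only [List.foldl_cons, hstep, List.foldl_nil]
            have hg0' : pvGoodVal g ["Bad"] = 0 := by rw [← pvGoodVal_cons_bad g []]; decide
            simp [hg0', pvDec]
        | some lr =>
            have hne : xs ≠ [] := by intro h; subst h; simp at hxs
            have hlast : ("Bad" :: xs).getLast? = some lr := by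
              rw [pv_getLast?_cons_ne hne]; exact hxs
            simp only [List.foldl_cons, hstep, hrec, hxs, hlast, ← hgood]
      · have hstep : pvStepA (b, g, s) x
            = (pvStepBad b x, min (g + 1) (pvNEEDED + 10),
               pvDec (pvStepBad b x) (min (g + 1) (pvNEEDED + 10)) x) := by
          simp [pvStepA, pvStepBad, pvDec, hx]
        have hrec := ih (pvStepBad b x) (min (g + 1) (pvNEEDED + 10))
          (pvDec (pvStepBad b x) (min (g + 1) (pvNEEDED + 10)) x)
          (by unfold pvNEEDED; omega) (by unfold pvNEEDED; omega)
        have hgood := pvGoodVal_cons_good g x xs hx hg0 hg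
        cases hxs : xs.getLast? with
        | none =>
            have hnil : xs = [] := List.getLast?_eq_none_iff.mp hxs
            subst hnil
            simp only [List.foldl_cons, hstep, List.foldl_nil]
            have hg1 : pvGoodVal g [x] = min (g + 1) (pvNEEDED + 10) := by
              rw [← pvGoodVal_cons_good g x [] hx hg0 hg]
              unfold pvGoodVal pvNEEDED
              simp
            simp [hg1, pvDec]
        | some lr =>
            have hne : xs ≠ [] := by intro h; subst h; simp at hxs
            have hlast : (x :: xs).getLast? = some lr := by
              rw [pv_getLast?_cons_ne hne]; exact hxs
            simp only [List.foldl_cons, hstep, hrec, hxs, hlast, ← hgood]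

lemma pvGoodVal_zero (seq : List String) :
    pvGoodVal 0 seq
      = min ((seq.reverse.takeWhile pvNotBad).length : Int) (pvNEEDED + 10) := by
  unfold pvGoodVal
  by_cases hall : seq.all pvNotBad = true
  · have : seq.reverse.takeWhile pvNotBad = seq.reverse := by
      apply pv_takeWhile_all
      intro y hy; exact (List.all_eq_true.mp hall) y (List.mem_reverse.mp hy)
    rw [hall, this]
    simp
  · simp [hall]

-- ===== VERDICT (by name: the statement is the Claim_ definition above) =====
theorem simulate_posture_smooth_py_spec : Claim_equal_simulate_posture_smooth_py := by
  intro sequence _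
  unfold Spec_simulate_posture_smooth_py simulate_posture_smooth_py simulate_posture_smooth_py_alt
  rw [pv_loopA_char sequence 0 0 "Good" le_rfl (by unfold pvNEEDED; omega)]
  cases hl : sequence.getLast? with
  | none => simp
  | some lr => simp [pvDec, pvGoodVal_zero]
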